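-- pv_equiv track=rewrite | github.com/zelinsky/hctf-2018-tasks | pwapi/lcg_java_expl.py | find_low_seed
-- ===== SOURCE A (Python) =====
-- def find_low_seed(outputs):
-- 	# These are the low bits of "bits"
-- 	# So these are the 18th bits of the state
-- 	low_bits = [i % 2 for i in outputs]
-- 	candidates = []
--
-- 	for i in range(2**18):
-- 		# state = (i ^ 25214903917) & 281474976710655
-- 		state = i
-- 		succ = True
-- 		for bit in low_bits:
-- 			state = (25214903917 * state + 11) & 281474976710655
-- 			if (state >> 17) % 2 != bit:
-- 				succ = False
-- 				break
-- 		if succ: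
-- 			candidates.append(i)
-- 	return candidates  # return all possible 17 bit values of lowest 17 bits of seed
-- ===== SOURCE B (Python) =====
-- def find_low_seed(outputs):
-- 	# Transposed search: one shrinking worklist of (seed, state) survivors,
-- 	# advanced bit by bit across the outputs instead of per-seed inner loops.
-- 	low_bits = [o % 2 for o in outputs]
-- 	pairs = [(i, i) for i in range(2**18)]
-- 	for bit in low_bits:
-- 		nxt = []
-- 		for seed, state in pairs:
-- 			state = (25214903917 * state + 11) & 281474976710655
-- 			if (state >> 17) % 2 == bit:
-- 				nxt.append((seed, state))
-- 		pairs = nxt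
-- 	return [seed for seed, _ in pairs]
-- ===== Notes on version B (the rewrite author's own statement) =====
-- stated objective: alternative
-- what changed: Transposed the two loops: instead of replaying the whole bit sequence per seed (2^18 independent inner loops with break), B carries one shrinking worklist of (seed, state) survivor pairs across a single pass over the output bits, advancing every surviving state one LCG step per bit and keeping only matches.
import Mathlib
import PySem

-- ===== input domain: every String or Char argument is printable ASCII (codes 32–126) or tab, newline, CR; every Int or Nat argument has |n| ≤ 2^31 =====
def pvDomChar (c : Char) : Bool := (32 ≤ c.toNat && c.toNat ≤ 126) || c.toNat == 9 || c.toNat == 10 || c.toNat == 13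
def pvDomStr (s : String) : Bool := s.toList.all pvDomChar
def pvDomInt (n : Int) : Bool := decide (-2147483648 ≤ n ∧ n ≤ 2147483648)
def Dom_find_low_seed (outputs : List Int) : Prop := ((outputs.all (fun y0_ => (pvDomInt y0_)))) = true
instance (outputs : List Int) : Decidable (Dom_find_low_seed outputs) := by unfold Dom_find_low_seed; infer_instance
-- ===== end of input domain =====

-- B transposes the two loops of A: one shrinking worklist of (seed, state) survivors advanced
-- bit by bit over the outputs, instead of A's per-seed inner replay (objective: alternative).
-- In both ports the Python lists grown by `.append` are built by consing and reversed once at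
-- the end — same elements in the same order as the Python append loop, with Python's O(1) append cost.

-- ===== PORT A =====
-- A's inner `for bit in low_bits` loop with its `break`: returns the final `succ`.
def aLoop : List Int → Int → Bool
  | [], _ => true
  | b :: bs, st =>
    let st' := PySem.Int.band (25214903917 * st + 11) 281474976710655
    if PySem.Int.mod (st' >>> 17) 2 ≠ b then false else aLoop bs st'

def find_low_seed (outputs : List Int) : List Int :=
  let low_bits := outputs.map (fun i => PySem.Int.mod i 2)
  ((PySem.List.pyRange 0 262144 1).foldl
    (fun candidates i => if aLoop low_bits i then i :: candidates else candidates) []).reverse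

-- ===== PORT B =====
-- B's inner `for seed, state in pairs` loop building `nxt`.
def bAdvance (pairs : List (Int × Int)) (bit : Int) : List (Int × Int) :=
  (pairs.foldl
    (fun nxt sp =>
      let st := PySem.Int.band (25214903917 * sp.2 + 11) 281474976710655
      if PySem.Int.mod (st >>> 17) 2 = bit then (sp.1, st) :: nxt else nxt) []).reverse

def find_low_seed_alt (outputs : List Int) : List Int :=
  let low_bits := outputs.map (fun o => PySem.Int.mod o 2)
  let pairs := (PySem.List.pyRange 0 262144 1).map (fun i => (i, i))
  (low_bits.foldl bAdvance pairs).map Prod.fst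

-- ===== PRECONDITION & SPEC =====
def Spec_find_low_seed (outputs : List Int) (out : List Int) : Prop := out = find_low_seed_alt outputs
instance (outputs : List Int) (out : List Int) : Decidable (Spec_find_low_seed outputs out) := by unfold Spec_find_low_seed; infer_instance

-- ===== CLAIM (what is proved, stated in full; the proofs are below) =====
def Claim_equal_find_low_seed : Prop := ∀ (outputs : List Int), Dom_find_low_seed outputs → Spec_find_low_seed outputs (find_low_seed outputs)

-- ===== LEMMAS AND PROOFS =====

-- the one LCG step and the bit test, as proof-side abbreviations
def lcg (st : Int) : Int := PySem.Int.band (25214903917 * st + 11) 281474976710655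
def okBit (bit st : Int) : Bool := decide (PySem.Int.mod (lcg st >>> 17) 2 = bit)

theorem aLoop_cons (b : Int) (bs : List Int) (st : Int) :
    aLoop (b :: bs) st = (okBit b st && aLoop bs (lcg st)) := by
  by_cases h : PySem.Int.mod (lcg st >>> 17) 2 = b <;>
    · simp only [aLoop, okBit, lcg] at *
      simp_all

-- the inner fold of bAdvance, accumulator-generalised
theorem bfold_aux (bit : Int) :
    ∀ (pairs : List (Int × Int)) (acc : List (Int × Int)),
      pairs.foldl
        (fun nxt sp =>
          if PySem.Int.mod (PySem.Int.band (25214903917 * sp.2 + 11) 281474976710655 >>> 17) 2 = bit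
          then (sp.1, PySem.Int.band (25214903917 * sp.2 + 11) 281474976710655) :: nxt else nxt) acc
      = ((pairs.filter (fun sp => okBit bit sp.2)).map (fun sp => (sp.1, lcg sp.2))).reverse ++ acc
  | [], acc => by simp
  | sp :: ps, acc => by
    simp only [List.foldl_cons, List.filter_cons]
    rw [bfold_aux bit ps]
    by_cases h : PySem.Int.mod (PySem.Int.band (25214903917 * sp.2 + 11) 281474976710655 >>> 17) 2 = bit
    · rw [if_pos h, if_pos (show okBit bit sp.2 = true by simpa [okBit, lcg] using h)]
      simp [lcg]
    · rw [if_neg h, if_neg (show ¬ okBit bit sp.2 = true by simpa [okBit, lcg] using h)]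

theorem bAdvance_eq (pairs : List (Int × Int)) (bit : Int) :
    bAdvance pairs bit
      = (pairs.filter (fun sp => okBit bit sp.2)).map (fun sp => (sp.1, lcg sp.2)) := by
  show (pairs.foldl
      (fun nxt sp =>
        if PySem.Int.mod (PySem.Int.band (25214903917 * sp.2 + 11) 281474976710655 >>> 17) 2 = bit
        then (sp.1, PySem.Int.band (25214903917 * sp.2 + 11) 281474976710655) :: nxt else nxt)
      []).reverse = _
  rw [bfold_aux]
  simp

-- one advance step then filtering by the rest of the bits = filtering by all bits at once
theorem step_lemma (b : Int) (bs : List Int) :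
    ∀ pairs : List (Int × Int),
      ((pairs.filter (fun sp => okBit b sp.2)).map (fun sp => (sp.1, lcg sp.2))).filter
          (fun sp => aLoop bs sp.2)
        = (pairs.filter (fun sp => aLoop (b :: bs) sp.2)).map (fun sp => (sp.1, lcg sp.2))
  | [] => by simp
  | sp :: ps => by
    by_cases h1 : okBit b sp.2 <;> by_cases h2 : aLoop bs (lcg sp.2) <;>
      simp [aLoop_cons, h1, h2, step_lemma b bs ps]

-- the transposed fold keeps exactly the seeds whose state survives A's inner loop
theorem key (bits : List Int) :
    ∀ pairs : List (Int × Int),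
      ((bits.foldl bAdvance pairs).map Prod.fst)
        = (pairs.filter (fun sp => aLoop bits sp.2)).map Prod.fst := by
  induction bits with
  | nil => intro pairs; simp [aLoop]
  | cons b bs ih =>
    intro pairs
    have h1 : (b :: bs).foldl bAdvance pairs = bs.foldl bAdvance (bAdvance pairs b) := rfl
    rw [h1, ih, bAdvance_eq, step_lemma, List.map_map]
    rfl

-- A's outer append loop is a filter of the seed range
theorem find_low_seed_eq_filter (outputs : List Int) :
    find_low_seed outputs
      = (PySem.List.pyRange 0 262144 1).filter
          (fun i => aLoop (outputs.map (fun o => PySem.Int.mod o 2)) i) := by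
  show ((PySem.List.pyRange 0 262144 1).foldl
      (fun candidates i =>
        if aLoop (outputs.map (fun o => PySem.Int.mod o 2)) i then i :: candidates else candidates)
      []).reverse = _
  have aux : ∀ (l : List Int) (acc : List Int),
      l.foldl (fun candidates i =>
          if aLoop (outputs.map (fun o => PySem.Int.mod o 2)) i then i :: candidates else candidates) acc
        = (l.filter (fun i => aLoop (outputs.map (fun o => PySem.Int.mod o 2)) i)).reverse ++ acc := by
    intro l
    induction l with
    | nil => intro acc; simp
    | cons x xs ih =>
      intro acc
      simp only [List.foldl_cons, List.filter_cons]
      rw [ih]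
      by_cases h : aLoop (outputs.map (fun o => PySem.Int.mod o 2)) x = true
      · rw [if_pos h, if_pos h]
        simp
      · rw [if_neg h, if_neg h]
  rw [aux]
  simp

-- ===== VERDICT (by name: the statement is the Claim_ definition above) =====
theorem find_low_seed_spec : Claim_equal_find_low_seed := by
  intro outputs _
  unfold Spec_find_low_seed find_low_seed_alt
  rw [key, List.filter_map, List.map_map, find_low_seed_eq_filter]
  simp [Function.comp_def]
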